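-- pv_equiv track=rewrite | github.com/shadow-1310/DSA_practice | company_specific/wallmart/test.py | updateArray
-- ===== SOURCE A (Python) =====
-- class SegmentTree:
--     def __init__(self, arr):
--         self.n = len(arr)
--         self.tree = [0] * (4 * self.n)
--         self.lazy = [0] * (4 * self.n)
--         self.build(1, 0, self.n - 1, arr)
--
--     def build(self, node, left, right, arr):
--         if left == right:
--             self.tree[node] = arr[left]
--             return
--         mid = (left + right) // 2
--         self.build(2 * node, left, mid, arr)
--         self.build(2 * node + 1, mid + 1, right, arr)
--         self.tree[node] = self.tree[2 * node] ^ self.tree[2 * node + 1]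
--
--     def update(self, node, left, right, l, r, val):
--         if left > right:
--             return
--         if self.lazy[node] != 0:
--             self.tree[node] ^= self.lazy[node]
--             if left != right:
--                 self.lazy[2 * node] ^= self.lazy[node]
--                 self.lazy[2 * node + 1] ^= self.lazy[node]
--             self.lazy[node] = 0
--
--         if l > right or r < left:
--             return
--
--         if l <= left and r >= right:
--             self.tree[node] ^= val
--             if left != right:
--                 self.lazy[2 * node] ^= val
--                 self.lazy[2 * node + 1] ^= val
--             return
--
--         mid = (left + right) // 2
--         self.update(2 * node, left, mid, l, r, val)
--         self.update(2 * node + 1, mid + 1, right, l, r, val)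
--         self.tree[node] = self.tree[2 * node] ^ self.tree[2 * node + 1]
--
--     def query(self, node, left, right, l, r):
--         if left > right:
--             return 0
--         if self.lazy[node] != 0:
--             self.tree[node] ^= self.lazy[node]
--             if left != right:
--                 self.lazy[2 * node] ^= self.lazy[node]
--                 self.lazy[2 * node + 1] ^= self.lazy[node]
--             self.lazy[node] = 0
--
--         if l > right or r < left:
--             return 0
--
--         if l <= left and r >= right:
--             return self.tree[node]
--
--         mid = (left + right) // 2
--         left_result = self.query(2 * node, left, mid, l, r)
--         right_result = self.query(2 * node + 1, mid + 1, right, l, r)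
--         return left_result ^ right_result
--
-- def updateArray(arr, queries):
--     seg_tree = SegmentTree(arr)
--     updated_arr = []
--
--     for query in queries:
--         l, r, v = query
--         seg_tree.update(1, 0, seg_tree.n - 1, l, r, v)
--
--     for i in range(seg_tree.n):
--         updated_arr.append(seg_tree.query(1, 0, seg_tree.n - 1, i, i))
--
--     return updated_arr
-- ===== SOURCE B (Python) =====
-- def updateArray(arr, queries):
--     # XOR difference array: mark endpoints per update, then prefix-XOR. O(n+q).
--     n = len(arr)
--     d = [0] * (n + 1)
--     for l, r, v in queries:
--         lo = max(l, 0)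
--         hi = min(r, n - 1)
--         if lo <= hi:
--             d[lo] ^= v
--             d[hi + 1] ^= v
--     out = []
--     acc = 0
--     for i, x in enumerate(arr):
--         acc ^= d[i]
--         out.append(x ^ acc)
--     return out
-- ===== Notes on version B (the rewrite author's own statement) =====
-- stated objective: faster
-- what changed: Replaced the lazy segment tree (build, q range updates, n point queries) by an XOR difference array: each update toggles two endpoints, one prefix-XOR pass produces the result.
-- outside the precondition, e.g. on updateArray([], [(0, 0, 1)]): A raises RecursionError, B returns []
import Mathlib
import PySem

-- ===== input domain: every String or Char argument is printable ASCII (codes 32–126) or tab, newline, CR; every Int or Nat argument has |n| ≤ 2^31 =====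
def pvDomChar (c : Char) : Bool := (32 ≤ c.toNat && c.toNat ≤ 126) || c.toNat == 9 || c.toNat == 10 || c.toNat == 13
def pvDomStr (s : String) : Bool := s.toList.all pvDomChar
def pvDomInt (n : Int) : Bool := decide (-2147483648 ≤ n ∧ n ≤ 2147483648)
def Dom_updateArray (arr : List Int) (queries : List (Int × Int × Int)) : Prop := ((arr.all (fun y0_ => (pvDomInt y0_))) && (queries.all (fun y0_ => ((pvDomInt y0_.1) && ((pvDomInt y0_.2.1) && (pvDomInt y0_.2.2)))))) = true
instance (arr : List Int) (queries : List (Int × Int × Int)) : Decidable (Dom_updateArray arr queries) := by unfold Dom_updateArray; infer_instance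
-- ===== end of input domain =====

-- B replaces A's lazy segment tree by an XOR difference array (two endpoint marks per
-- update, one prefix-XOR pass); equivalence is about the return value (no argument is mutated).

-- ===== PORT A =====
-- The SegmentTree's `tree` and `lazy` Python lists are ported as total functions Nat → Int
-- (Python indexes them only below 4*n on every input Pre_ admits, so reads/writes agree);
-- the recursions carry a fuel argument that is never exhausted on inputs Pre_ admits
-- (Python instead recurses forever / overflows the stack when arr is empty).
abbrev St : Type := (Nat → Int) × (Nat → Int)

def fset (f : Nat → Int) (i : Nat) (x : Int) : Nat → Int := fun j => if j = i then x else f j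

-- the lazy push-down that opens both `update` and `query` in Python
def segPush (node : Nat) (left right : Int) (s : St) : St :=
  if s.2 node ≠ 0 then
    let L := s.2 node
    let t1 := fset s.1 node (PySem.Int.bxor (s.1 node) L)
    let l1 := if left ≠ right then
        fset (fset s.2 (2*node) (PySem.Int.bxor (s.2 (2*node)) L)) (2*node+1)
          (PySem.Int.bxor (s.2 (2*node+1)) L)
      else s.2
    (t1, fset l1 node 0)
  else s

def segBuild (fuel : Nat) (arr : List Int) (node : Nat) (left right : Int) (s : St) : St :=
  match fuel with
  | 0 => s
  | f+1 =>
    if left = right then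
      (fset s.1 node ((PySem.List.pyGet? arr left).getD 0), s.2)  -- arr[left]; in range on every admitted input
    else
      let mid := PySem.Int.floordiv (left + right) 2
      let s1 := segBuild f arr (2*node) left mid s
      let s2 := segBuild f arr (2*node+1) (mid+1) right s1
      (fset s2.1 node (PySem.Int.bxor (s2.1 (2*node)) (s2.1 (2*node+1))), s2.2)

def segUpdate (fuel : Nat) (node : Nat) (left right l r val : Int) (s : St) : St :=
  match fuel with
  | 0 => s
  | f+1 =>
    if left > right then s
    else
      let s1 := segPush node left right s
      if l > right ∨ r < left then s1
      else if l ≤ left ∧ r ≥ right then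
        let s2 : St := (fset s1.1 node (PySem.Int.bxor (s1.1 node) val), s1.2)
        if left ≠ right then
          (s2.1, fset (fset s2.2 (2*node) (PySem.Int.bxor (s2.2 (2*node)) val)) (2*node+1)
            (PySem.Int.bxor (s2.2 (2*node+1)) val))
        else s2
      else
        let mid := PySem.Int.floordiv (left + right) 2
        let s2 := segUpdate f (2*node) left mid l r val s1
        let s3 := segUpdate f (2*node+1) (mid+1) right l r val s2
        (fset s3.1 node (PySem.Int.bxor (s3.1 (2*node)) (s3.1 (2*node+1))), s3.2)

def segQuery (fuel : Nat) (node : Nat) (left right l r : Int) (s : St) : Int × St :=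
  match fuel with
  | 0 => (0, s)
  | f+1 =>
    if left > right then (0, s)
    else
      let s1 := segPush node left right s
      if l > right ∨ r < left then (0, s1)
      else if l ≤ left ∧ r ≥ right then (s1.1 node, s1)
      else
        let mid := PySem.Int.floordiv (left + right) 2
        let q1 := segQuery f (2*node) left mid l r s1
        let q2 := segQuery f (2*node+1) (mid+1) right l r q1.2
        (PySem.Int.bxor q1.1 q2.1, q2.2)

def updateArray (arr : List Int) (queries : List (Int × Int × Int)) : List Int :=
  let n := arr.length
  let s1 := segBuild n arr 1 0 ((n:Int) - 1) (fun _ => 0, fun _ => 0)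
  let s2 := queries.foldl (fun s q => segUpdate n 1 0 ((n:Int) - 1) q.1 q.2.1 q.2.2 s) s1
  (List.foldl (fun (acc : List Int × St) (i : Nat) =>
      let qr := segQuery n 1 0 ((n:Int) - 1) (i:Int) (i:Int) acc.2
      (acc.1 ++ [qr.1], qr.2)) ([], s2) (List.range n)).1

-- ===== PORT B =====
-- second pass of Source B: running prefix-XOR `acc` over the difference list `d` while walking arr
def altScan (d : List Int) (acc : Int) (i : Nat) : List Int → List Int
  | [] => []
  | x :: xs =>
    let acc' := PySem.Int.bxor acc (d.getD i 0)
    PySem.Int.bxor x acc' :: altScan d acc' (i+1) xs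

def updateArray_alt (arr : List Int) (queries : List (Int × Int × Int)) : List Int :=
  let n := arr.length
  let d := queries.foldl (fun (d : List Int) q =>
      let lo := max q.1 0
      let hi := min q.2.1 ((n:Int) - 1)
      if lo ≤ hi then
        -- lo and hi+1 are nonnegative here, so .toNat indexing is exact
        let d1 := d.set lo.toNat (PySem.Int.bxor (d.getD lo.toNat 0) q.2.2)
        d1.set (hi+1).toNat (PySem.Int.bxor (d1.getD (hi+1).toNat 0) q.2.2)
      else d) (List.replicate (n+1) 0)
  altScan d 0 0 arr

-- ===== PRECONDITION & SPEC =====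
-- Pre_ excludes only the empty array, on which A's SegmentTree.build recurses forever
-- (Python raises RecursionError before returning anything).
def Pre_updateArray (arr : List Int) (queries : List (Int × Int × Int)) : Prop := arr ≠ []
instance (arr : List Int) (queries : List (Int × Int × Int)) : Decidable (Pre_updateArray arr queries) := by unfold Pre_updateArray; infer_instance

def pvWitness_updateArray : List Int × (List (Int × Int × Int)) := ([1, 2, 3], [(0, 1, 5), (1, 2, 3)])

def Spec_updateArray (arr : List Int) (queries : List (Int × Int × Int)) (out : List Int) : Prop := out = updateArray_alt arr queries
instance (arr : List Int) (queries : List (Int × Int × Int)) (out : List Int) : Decidable (Spec_updateArray arr queries out) := by unfold Spec_updateArray; infer_instance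

-- ===== CLAIM (what is proved, stated in full; the proofs are below) =====
def Claim_equal_updateArray : Prop := ∀ (arr : List Int) (queries : List (Int × Int × Int)), Dom_updateArray arr queries → Pre_updateArray arr queries → Spec_updateArray arr queries (updateArray arr queries)

-- ===== LEMMAS AND PROOFS =====

-- XOR algebra for PySem.Int.bxor
theorem bxor_eq_xor (a b : Int) : PySem.Int.bxor a b = Int.xor a b := by
  unfold PySem.Int.bxor Int.xor
  rcases a with m | m <;> rcases b with n | n <;> simp [Int.negSucc_eq] <;> omega

theorem bxor_assoc (a b c : Int) :
    PySem.Int.bxor (PySem.Int.bxor a b) c = PySem.Int.bxor a (PySem.Int.bxor b c) := by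
  simp only [bxor_eq_xor]
  rcases a with m | m <;> rcases b with n | n <;> rcases c with p | p <;>
    simp [Int.xor, Nat.xor_assoc]

theorem zero_bxor (a : Int) : PySem.Int.bxor 0 a = a := by
  rw [PySem.Int.bxor_comm]; exact PySem.Int.bxor_zero a

theorem bxor_rot (a b c : Int) :
    PySem.Int.bxor a (PySem.Int.bxor b c) = PySem.Int.bxor b (PySem.Int.bxor a c) := by
  rw [← bxor_assoc, PySem.Int.bxor_comm a b, bxor_assoc]

-- fset
theorem fset_same (f : Nat → Int) (i : Nat) (x : Int) : fset f i x i = x := by simp [fset]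

theorem fset_other (f : Nat → Int) (i : Nat) (x : Int) {j : Nat} (h : j ≠ i) :
    fset f i x j = f j := by simp [fset, h]

-- the implicit binary tree: v lies in the subtree rooted at u
def inTree (u v : Nat) : Prop := ∃ k, u * 2^k ≤ v ∧ v < (u+1) * 2^k

theorem inTree_self (u : Nat) : inTree u u := ⟨0, by simp⟩

theorem inTree_ge {u v : Nat} (h : inTree u v) : u ≤ v := by
  obtain ⟨k, h1, h2⟩ := h
  calc u = u * 1 := by ring
    _ ≤ u * 2^k := Nat.mul_le_mul_left u (Nat.one_le_two_pow)
    _ ≤ v := h1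

theorem inTree_left {u w : Nat} (h : inTree (2*u) w) : inTree u w := by
  obtain ⟨k, h1, h2⟩ := h
  refine ⟨k+1, ?_, ?_⟩ <;> rw [pow_succ] <;> nlinarith [h1, h2]

theorem inTree_right {u w : Nat} (h : inTree (2*u+1) w) : inTree u w := by
  obtain ⟨k, h1, h2⟩ := h
  refine ⟨k+1, ?_, ?_⟩ <;> rw [pow_succ] <;> nlinarith [h1, h2]

theorem inTree_disjoint {u w : Nat} (hu : 1 ≤ u) (h1 : inTree (2*u) w) (h2 : inTree (2*u+1) w) : False := by
  obtain ⟨k, a1, a2⟩ := h1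
  obtain ⟨j, b1, b2⟩ := h2
  rcases Nat.lt_or_ge j k with hjk | hkj
  · have hp : 2^(j+1) ≤ 2^k := Nat.pow_le_pow_right (by norm_num) hjk
    have h4 : 2*u * 2^(j+1) ≤ 2*u * 2^k := Nat.mul_le_mul_left _ hp
    have h5 : 2*u * 2^(j+1) = 4*u * 2^j := by rw [pow_succ]; ring
    nlinarith [b2, a1]
  · have : (2*u+1) * 2^k ≤ (2*u+1) * 2^j :=
      Nat.mul_le_mul_left _ (Nat.pow_le_pow_right (by norm_num) hkj)
    omega

theorem not_inTree_lt {u w : Nat} (h : w < u) : ¬ inTree u w := fun hs => absurd (inTree_ge hs) (by omega)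


theorem bxor_right_comm (a b c : Int) :
    PySem.Int.bxor (PySem.Int.bxor a b) c = PySem.Int.bxor (PySem.Int.bxor a c) b := by
  rw [bxor_assoc, PySem.Int.bxor_comm b c, ← bxor_assoc]

theorem bxor_swap_left (x L R : Int) :
    PySem.Int.bxor (PySem.Int.bxor x L) R = PySem.Int.bxor L (PySem.Int.bxor x R) := by
  rw [bxor_assoc, bxor_rot]

theorem inTree_child_l (u : Nat) : inTree u (2*u) := inTree_left (inTree_self (2*u))

theorem inTree_child_r (u : Nat) : inTree u (2*u+1) := inTree_right (inTree_self (2*u+1))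

theorem ne_top_l {u w : Nat} (hu : 1 ≤ u) (hw : inTree (2*u) w) : w ≠ u := by
  have := inTree_ge hw; omega

theorem ne_top_r {u w : Nat} (hu : 1 ≤ u) (hw : inTree (2*u+1) w) : w ≠ u := by
  have := inTree_ge hw; omega

theorem ne_sib_l {u w : Nat} (hu : 1 ≤ u) (hw : inTree (2*u) w) : w ≠ 2*u+1 :=
  fun e => inTree_disjoint hu hw (e ▸ inTree_self _)

theorem ne_sib_r {u w : Nat} (hu : 1 ≤ u) (hw : inTree (2*u+1) w) : w ≠ 2*u :=
  fun e => inTree_disjoint hu (e ▸ inTree_self _) hw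

def agreeOn (s s' : St) (u : Nat) : Prop := ∀ w, inTree u w → s.1 w = s'.1 w ∧ s.2 w = s'.2 w

-- the effective (post-lazy) value of index i as seen from node (node, [left,right])
def vAt : Nat → St → Nat → Int → Int → Int → Int
  | 0, _, _, _, _, _ => 0
  | f+1, s, node, left, right, i =>
    PySem.Int.bxor (s.2 node)
      (if left = right then s.1 node
       else if i ≤ PySem.Int.floordiv (left + right) 2
         then vAt f s (2*node) left (PySem.Int.floordiv (left + right) 2) i
         else vAt f s (2*node+1) ((PySem.Int.floordiv (left + right) 2)+1) right i)

-- XOR of the values of all queries covering index i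
def cov (i : Int) : List (Int × Int × Int) → Int
  | [] => 0
  | q :: qs => PySem.Int.bxor (if q.1 ≤ i ∧ i ≤ q.2.1 then q.2.2 else 0) (cov i qs)

theorem mid_lb {a b : Int} (h : a ≤ b) : a ≤ PySem.Int.floordiv (a+b) 2 :=
  (PySem.Int.floordiv_two_mid_bounds h).1

theorem mid_lt {a b : Int} (h : a < b) : PySem.Int.floordiv (a+b) 2 < b := by
  rw [PySem.Int.floordiv_eq_ediv_of_pos (by norm_num)]; omega


theorem segPush_zero {u : Nat} {a b : Int} {s : St} (h0 : ¬ s.2 u ≠ 0) :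
    segPush u a b s = s := by
  simp [segPush, h0]

theorem segPush_leaf {u : Nat} {a b : Int} {s : St} (h0 : s.2 u ≠ 0) (hab : a = b) :
    segPush u a b s = (fset s.1 u (PySem.Int.bxor (s.1 u) (s.2 u)), fset s.2 u 0) := by
  simp [segPush, h0, hab]

theorem segPush_node {u : Nat} {a b : Int} {s : St} (h0 : s.2 u ≠ 0) (hab : a ≠ b) :
    segPush u a b s = (fset s.1 u (PySem.Int.bxor (s.1 u) (s.2 u)),
      fset (fset (fset s.2 (2*u) (PySem.Int.bxor (s.2 (2*u)) (s.2 u))) (2*u+1)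
        (PySem.Int.bxor (s.2 (2*u+1)) (s.2 u))) u 0) := by
  simp [segPush, h0, hab]

theorem vAt_congr : ∀ (f : Nat) (s s' : St) (u : Nat) (a b i : Int),
    agreeOn s s' u → vAt f s u a b i = vAt f s' u a b i := by
  intro f
  induction f with
  | zero => intro s s' u a b i _; rfl
  | succ f ih =>
    intro s s' u a b i h
    have hu := h u (inTree_self u)
    simp only [vAt]
    rw [hu.2]
    congr 1
    split_ifs with h1 h2
    · exact hu.1
    · exact ih _ _ _ _ _ _ (fun w hw => h w (inTree_left hw))
    · exact ih _ _ _ _ _ _ (fun w hw => h w (inTree_right hw))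

theorem push_out (u : Nat) (a b : Int) (s : St) (w : Nat) (hw : ¬ inTree u w) :
    (segPush u a b s).1 w = s.1 w ∧ (segPush u a b s).2 w = s.2 w := by
  have hwu : w ≠ u := fun e => hw (e ▸ inTree_self u)
  have hwl : w ≠ 2*u := fun e => hw (e ▸ inTree_child_l u)
  have hwr : w ≠ 2*u+1 := fun e => hw (e ▸ inTree_child_r u)
  by_cases h0 : s.2 u ≠ 0
  · by_cases hab : a = b
    · rw [segPush_leaf h0 hab]; constructor <;> simp [fset, hwu]
    · rw [segPush_node h0 hab]
      constructor <;> simp [fset, hwu, hwl, hwr]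
  · rw [segPush_zero h0]; exact ⟨rfl, rfl⟩

theorem push_lazy_self (u : Nat) (a b : Int) (s : St) (hu : 1 ≤ u) :
    (segPush u a b s).2 u = 0 := by
  by_cases h0 : s.2 u ≠ 0
  · by_cases hab : a = b
    · rw [segPush_leaf h0 hab]; simp [fset]
    · rw [segPush_node h0 hab]; simp [fset]
  · rw [segPush_zero h0]; exact not_not.mp h0

theorem vAt_setLazy {f u : Nat} {a b i L : Int} (s : St) (hu : 1 ≤ u) (hab : a ≤ b)
    (hf : (b - a).toNat < f) :
    vAt f (s.1, fset s.2 u (PySem.Int.bxor (s.2 u) L)) u a b i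
      = PySem.Int.bxor L (vAt f s u a b i) := by
  cases f with
  | zero => omega
  | succ f =>
    simp only [vAt]
    rw [fset_same]
    split_ifs with h1 h2
    · exact bxor_swap_left _ _ _
    · rw [vAt_congr f (s.1, fset s.2 u (PySem.Int.bxor (s.2 u) L)) s (2*u) a _ i
        (fun w hw => ⟨rfl, fset_other _ _ _ (ne_top_l hu hw)⟩)]
      exact bxor_swap_left _ _ _
    · rw [vAt_congr f (s.1, fset s.2 u (PySem.Int.bxor (s.2 u) L)) s (2*u+1) _ b i
        (fun w hw => ⟨rfl, fset_other _ _ _ (ne_top_r hu hw)⟩)]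
      exact bxor_swap_left _ _ _

theorem push_vAt {f u : Nat} {a b : Int} (s : St) (hu : 1 ≤ u) (hab : a ≤ b)
    (hf : (b - a).toNat < f) (i : Int) :
    vAt f (segPush u a b s) u a b i = vAt f s u a b i := by
  cases f with
  | zero => omega
  | succ f =>
    by_cases h0 : s.2 u ≠ 0
    · by_cases hab' : a = b
      · rw [segPush_leaf h0 hab']
        subst hab'
        simp [vAt, fset, zero_bxor, PySem.Int.bxor_comm]
      · rw [segPush_node h0 hab']
        have hlt : a < b := lt_of_le_of_ne hab hab'
        have hmid1 : a ≤ PySem.Int.floordiv (a+b) 2 := mid_lb hab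
        have hmid2 : PySem.Int.floordiv (a+b) 2 < b := mid_lt hlt
        simp only [vAt, if_neg hab', fset_same]
        split_ifs with hi
        · rw [vAt_congr f _ (s.1, fset s.2 (2*u) (PySem.Int.bxor (s.2 (2*u)) (s.2 u))) (2*u) a _ i
            (fun w hw => ⟨fset_other _ _ _ (ne_top_l hu hw), by
              simp [fset, ne_top_l hu hw, ne_sib_l hu hw]⟩)]
          rw [vAt_setLazy s (by omega) hmid1 (by omega), zero_bxor]
        · rw [vAt_congr f _ (s.1, fset s.2 (2*u+1) (PySem.Int.bxor (s.2 (2*u+1)) (s.2 u))) (2*u+1) _ b i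
            (fun w hw => ⟨fset_other _ _ _ (ne_top_r hu hw), by
              simp [fset, ne_top_r hu hw, ne_sib_r hu hw]⟩)]
          rw [vAt_setLazy s (by omega) (by omega) (by omega), zero_bxor]
    · rw [segPush_zero h0]


theorem segUpdate_stop {f u : Nat} {a b ql qr v : Int} {s : St} (h1 : a > b) :
    segUpdate (f+1) u a b ql qr v s = s := by
  simp only [segUpdate]; rw [if_pos h1]

theorem segUpdate_dis {f u : Nat} {a b ql qr v : Int} {s : St} (h1 : ¬ a > b)
    (h2 : ql > b ∨ qr < a) :
    segUpdate (f+1) u a b ql qr v s = segPush u a b s := by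
  simp only [segUpdate]; rw [if_neg h1, if_pos h2]

theorem segUpdate_cov_leaf {f u : Nat} {a b ql qr v : Int} {s : St} (h1 : ¬ a > b)
    (h2 : ¬ (ql > b ∨ qr < a)) (h3 : ql ≤ a ∧ qr ≥ b) (h4 : a = b) :
    segUpdate (f+1) u a b ql qr v s =
      (fset (segPush u a b s).1 u (PySem.Int.bxor ((segPush u a b s).1 u) v), (segPush u a b s).2) := by
  simp only [segUpdate]; rw [if_neg h1, if_neg h2, if_pos h3, if_neg (by omega : ¬ a ≠ b)]

theorem segUpdate_cov_node {f u : Nat} {a b ql qr v : Int} {s : St} (h1 : ¬ a > b)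
    (h2 : ¬ (ql > b ∨ qr < a)) (h3 : ql ≤ a ∧ qr ≥ b) (h4 : a ≠ b) :
    segUpdate (f+1) u a b ql qr v s =
      (fset (segPush u a b s).1 u (PySem.Int.bxor ((segPush u a b s).1 u) v),
       fset (fset (segPush u a b s).2 (2*u) (PySem.Int.bxor ((segPush u a b s).2 (2*u)) v)) (2*u+1)
         (PySem.Int.bxor ((segPush u a b s).2 (2*u+1)) v)) := by
  simp only [segUpdate]; rw [if_neg h1, if_neg h2, if_pos h3, if_pos h4]

theorem segUpdate_rec {f u : Nat} {a b ql qr v : Int} {s : St} (h1 : ¬ a > b)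
    (h2 : ¬ (ql > b ∨ qr < a)) (h3 : ¬ (ql ≤ a ∧ qr ≥ b)) :
    segUpdate (f+1) u a b ql qr v s =
      (fset (segUpdate f (2*u+1) (PySem.Int.floordiv (a+b) 2+1) b ql qr v (segUpdate f (2*u) a (PySem.Int.floordiv (a+b) 2) ql qr v (segPush u a b s))).1 u (PySem.Int.bxor ((segUpdate f (2*u+1) (PySem.Int.floordiv (a+b) 2+1) b ql qr v (segUpdate f (2*u) a (PySem.Int.floordiv (a+b) 2) ql qr v (segPush u a b s))).1 (2*u)) ((segUpdate f (2*u+1) (PySem.Int.floordiv (a+b) 2+1) b ql qr v (segUpdate f (2*u) a (PySem.Int.floordiv (a+b) 2) ql qr v (segPush u a b s))).1 (2*u+1))), (segUpdate f (2*u+1) (PySem.Int.floordiv (a+b) 2+1) b ql qr v (segUpdate f (2*u) a (PySem.Int.floordiv (a+b) 2) ql qr v (segPush u a b s))).2) := by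
  simp only [segUpdate]; rw [if_neg h1, if_neg h2, if_neg h3]

theorem bxor_pull (L T v : Int) :
    PySem.Int.bxor L (PySem.Int.bxor T v) = PySem.Int.bxor v (PySem.Int.bxor L T) := by
  rw [PySem.Int.bxor_comm T v]; exact bxor_rot L v T

theorem upd_out : ∀ (f u : Nat) (a b ql qr v : Int) (s : St) (w : Nat), 1 ≤ u → ¬ inTree u w →
    (segUpdate f u a b ql qr v s).1 w = s.1 w ∧ (segUpdate f u a b ql qr v s).2 w = s.2 w := by
  intro f
  induction f with
  | zero => intro u a b ql qr v s w _ _; exact ⟨rfl, rfl⟩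
  | succ f ih =>
    intro u a b ql qr v s w hu hw
    have hwu : w ≠ u := fun e => hw (e ▸ inTree_self u)
    have hwl : w ≠ 2*u := fun e => hw (e ▸ inTree_child_l u)
    have hwr : w ≠ 2*u+1 := fun e => hw (e ▸ inTree_child_r u)
    have hp := push_out u a b s w hw
    by_cases h1 : a > b
    · rw [segUpdate_stop h1]; exact ⟨rfl, rfl⟩
    by_cases h2 : ql > b ∨ qr < a
    · rw [segUpdate_dis h1 h2]; exact hp
    by_cases h3 : ql ≤ a ∧ qr ≥ b
    · by_cases h4 : a = b
      · rw [segUpdate_cov_leaf h1 h2 h3 h4]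
        exact ⟨by simp [fset, hwu, hp.1], hp.2⟩
      · rw [segUpdate_cov_node h1 h2 h3 h4]
        exact ⟨by simp [fset, hwu, hp.1], by simp [fset, hwl, hwr, hp.2]⟩
    · rw [segUpdate_rec h1 h2 h3]
      have hwL : ¬ inTree (2*u) w := fun hh => hw (inTree_left hh)
      have hwR : ¬ inTree (2*u+1) w := fun hh => hw (inTree_right hh)
      have h5 := ih (2*u) a (PySem.Int.floordiv (a+b) 2) ql qr v (segPush u a b s) w (by omega) hwL
      have h6 := ih (2*u+1) (PySem.Int.floordiv (a+b) 2+1) b ql qr v (segUpdate f (2*u) a (PySem.Int.floordiv (a+b) 2) ql qr v (segPush u a b s)) w (by omega) hwR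
      exact ⟨by show fset (segUpdate f (2*u+1) (PySem.Int.floordiv (a+b) 2+1) b ql qr v (segUpdate f (2*u) a (PySem.Int.floordiv (a+b) 2) ql qr v (segPush u a b s))).1 u _ w = s.1 w
                rw [fset_other _ _ _ hwu, h6.1, h5.1, hp.1],
             by show (segUpdate f (2*u+1) (PySem.Int.floordiv (a+b) 2+1) b ql qr v (segUpdate f (2*u) a (PySem.Int.floordiv (a+b) 2) ql qr v (segPush u a b s))).2 w = s.2 w; rw [h6.2, h5.2, hp.2]⟩

theorem upd_vAt : ∀ (f u : Nat) (a b ql qr v i : Int) (s : St), 1 ≤ u → a ≤ b →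
    (b - a).toNat < f → a ≤ i → i ≤ b →
    vAt f (segUpdate f u a b ql qr v s) u a b i
      = PySem.Int.bxor (if ql ≤ i ∧ i ≤ qr then v else 0) (vAt f s u a b i) := by
  intro f
  induction f with
  | zero => intro u a b ql qr v i s _ _ hf _ _; omega
  | succ f ih =>
    intro u a b ql qr v i s hu hab hf hai hib
    have h1 : ¬ a > b := by omega
    by_cases h2 : ql > b ∨ qr < a
    · rw [segUpdate_dis h1 h2, push_vAt s hu hab (by omega), if_neg (by omega), zero_bxor]
    by_cases h3 : ql ≤ a ∧ qr ≥ b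
    · rw [if_pos (by omega)]
      by_cases h4 : a = b
      · rw [segUpdate_cov_leaf h1 h2 h3 h4, ← push_vAt s hu hab (by omega : (b-a).toNat < f+1) i]
        subst h4
        simp only [vAt, if_pos rfl, fset_same]
        exact bxor_pull _ _ _
      · rw [segUpdate_cov_node h1 h2 h3 h4, ← push_vAt s hu hab (by omega : (b-a).toNat < f+1) i]
        have hlt : a < b := lt_of_le_of_ne hab h4
        have hm1 : a ≤ PySem.Int.floordiv (a+b) 2 := mid_lb hab
        have hm2 : PySem.Int.floordiv (a+b) 2 < b := mid_lt hlt
        simp only [vAt, if_neg h4]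
        rw [fset_other _ _ _ (by omega : u ≠ 2*u+1), fset_other _ _ _ (by omega : u ≠ 2*u)]
        split_ifs with hi
        · rw [vAt_congr f _ ((segPush u a b s).1, fset (segPush u a b s).2 (2*u) (PySem.Int.bxor ((segPush u a b s).2 (2*u)) v))
              (2*u) a (PySem.Int.floordiv (a+b) 2) i
              (fun w hw => ⟨fset_other _ _ _ (ne_top_l hu hw), by
                simp [fset, ne_top_l hu hw, ne_sib_l hu hw]⟩),
            vAt_setLazy (segPush u a b s) (by omega) hm1 (by omega)]
          exact bxor_rot _ _ _
        · rw [vAt_congr f _ ((segPush u a b s).1, fset (segPush u a b s).2 (2*u+1) (PySem.Int.bxor ((segPush u a b s).2 (2*u+1)) v))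
              (2*u+1) (PySem.Int.floordiv (a+b) 2+1) b i
              (fun w hw => ⟨fset_other _ _ _ (ne_top_r hu hw), by
                simp [fset, ne_top_r hu hw, ne_sib_r hu hw]⟩),
            vAt_setLazy (segPush u a b s) (by omega) (by omega) (by omega)]
          exact bxor_rot _ _ _
    · rw [segUpdate_rec h1 h2 h3, ← push_vAt s hu hab (by omega : (b-a).toNat < f+1) i]
      have h4 : a ≠ b := by
        intro e; push_neg at h2; exact h3 ⟨by omega, by omega⟩
      have hlt : a < b := lt_of_le_of_ne hab h4
      have hm1 : a ≤ PySem.Int.floordiv (a+b) 2 := mid_lb hab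
      have hm2 : PySem.Int.floordiv (a+b) 2 < b := mid_lt hlt
      have e3 : (segUpdate f (2*u+1) (PySem.Int.floordiv (a+b) 2+1) b ql qr v (segUpdate f (2*u) a (PySem.Int.floordiv (a+b) 2) ql qr v (segPush u a b s))).2 u = (segUpdate f (2*u) a (PySem.Int.floordiv (a+b) 2) ql qr v (segPush u a b s)).2 u :=
        (upd_out f (2*u+1) (PySem.Int.floordiv (a+b) 2+1) b ql qr v (segUpdate f (2*u) a (PySem.Int.floordiv (a+b) 2) ql qr v (segPush u a b s)) u (by omega) (not_inTree_lt (by omega))).2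
      have e2 : (segUpdate f (2*u) a (PySem.Int.floordiv (a+b) 2) ql qr v (segPush u a b s)).2 u = (segPush u a b s).2 u :=
        (upd_out f (2*u) a (PySem.Int.floordiv (a+b) 2) ql qr v (segPush u a b s) u (by omega) (not_inTree_lt (by omega))).2
      by_cases hi : i ≤ PySem.Int.floordiv (a+b) 2
      · simp only [vAt, if_neg h4, if_pos hi]
        rw [show ((fset (segUpdate f (2*u+1) (PySem.Int.floordiv (a+b) 2+1) b ql qr v (segUpdate f (2*u) a (PySem.Int.floordiv (a+b) 2) ql qr v (segPush u a b s))).1 u (PySem.Int.bxor ((segUpdate f (2*u+1) (PySem.Int.floordiv (a+b) 2+1) b ql qr v (segUpdate f (2*u) a (PySem.Int.floordiv (a+b) 2) ql qr v (segPush u a b s))).1 (2*u)) ((segUpdate f (2*u+1) (PySem.Int.floordiv (a+b) 2+1) b ql qr v (segUpdate f (2*u) a (PySem.Int.floordiv (a+b) 2) ql qr v (segPush u a b s))).1 (2*u+1))), (segUpdate f (2*u+1) (PySem.Int.floordiv (a+b) 2+1) b ql qr v (segUpdate f (2*u) a (PySem.Int.floordiv (a+b) 2) ql qr v (segPush u a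 b s))).2)).2 = (segUpdate f (2*u+1) (PySem.Int.floordiv (a+b) 2+1) b ql qr v (segUpdate f (2*u) a (PySem.Int.floordiv (a+b) 2) ql qr v (segPush u a b s))).2 from rfl, e3, e2]
        rw [vAt_congr f (fset (segUpdate f (2*u+1) (PySem.Int.floordiv (a+b) 2+1) b ql qr v (segUpdate f (2*u) a (PySem.Int.floordiv (a+b) 2) ql qr v (segPush u a b s))).1 u (PySem.Int.bxor ((segUpdate f (2*u+1) (PySem.Int.floordiv (a+b) 2+1) b ql qr v (segUpdate f (2*u) a (PySem.Int.floordiv (a+b) 2) ql qr v (segPush u a b s))).1 (2*u)) ((segUpdate f (2*u+1) (PySem.Int.floordiv (a+b) 2+1) b ql qr v (segUpdate f (2*u) a (PySem.Int.floordiv (a+b) 2) ql qr v (segPush u a b s))).1 (2*u+1))), (segUpdate f (2*u+1) (PySem.Int.floordiv (a+b) 2+1) b ql qr v (segUpdate f (2*u) a (PySem.Int.floordiv (a+b) 2) ql qr v (segPush u a b s))).2) (segUpdate f (2*u+1) (PySem.Int.floordiv (a+b) 2+1) b ql qr v (segUpdate f (2*u) a (PySem.Int.floordiv (a+b) 2)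 ql qr v (segPush u a b s))) (2*u) a (PySem.Int.floordiv (a+b) 2) i
            (fun w hw => ⟨fset_other _ _ _ (ne_top_l hu hw), rfl⟩),
          vAt_congr f (segUpdate f (2*u+1) (PySem.Int.floordiv (a+b) 2+1) b ql qr v (segUpdate f (2*u) a (PySem.Int.floordiv (a+b) 2) ql qr v (segPush u a b s))) (segUpdate f (2*u) a (PySem.Int.floordiv (a+b) 2) ql qr v (segPush u a b s)) (2*u) a (PySem.Int.floordiv (a+b) 2) i
            (fun w hw => upd_out f (2*u+1) (PySem.Int.floordiv (a+b) 2+1) b ql qr v (segUpdate f (2*u) a (PySem.Int.floordiv (a+b) 2) ql qr v (segPush u a b s)) w (by omega)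
              (fun hh => inTree_disjoint hu hw hh)),
          ih (2*u) a (PySem.Int.floordiv (a+b) 2) ql qr v i (segPush u a b s) (by omega) hm1 (by omega) hai hi]
        exact bxor_rot _ _ _
      · simp only [vAt, if_neg h4, if_neg hi]
        rw [show ((fset (segUpdate f (2*u+1) (PySem.Int.floordiv (a+b) 2+1) b ql qr v (segUpdate f (2*u) a (PySem.Int.floordiv (a+b) 2) ql qr v (segPush u a b s))).1 u (PySem.Int.bxor ((segUpdate f (2*u+1) (PySem.Int.floordiv (a+b) 2+1) b ql qr v (segUpdate f (2*u) a (PySem.Int.floordiv (a+b) 2) ql qr v (segPush u a b s))).1 (2*u)) ((segUpdate f (2*u+1) (PySem.Int.floordiv (a+b) 2+1) b ql qr v (segUpdate f (2*u) a (PySem.Int.floordiv (a+b) 2) ql qr v (segPush u a b s))).1 (2*u+1))), (segUpdate f (2*u+1) (PySem.Int.floordiv (a+b) 2+1) b ql qr v (segUpdate f (2*u) a (PySem.Int.floordiv (a+b) 2) ql qr v (segPush u a b s))).2)).2 = (segUpdate f (2*u+1) (PySem.Int.floordiv (a+b) 2+1) b ql qr v (segUpdate f (2*u) a (PySem.Int.floordiv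 (a+b) 2) ql qr v (segPush u a b s))).2 from rfl, e3, e2]
        rw [vAt_congr f (fset (segUpdate f (2*u+1) (PySem.Int.floordiv (a+b) 2+1) b ql qr v (segUpdate f (2*u) a (PySem.Int.floordiv (a+b) 2) ql qr v (segPush u a b s))).1 u (PySem.Int.bxor ((segUpdate f (2*u+1) (PySem.Int.floordiv (a+b) 2+1) b ql qr v (segUpdate f (2*u) a (PySem.Int.floordiv (a+b) 2) ql qr v (segPush u a b s))).1 (2*u)) ((segUpdate f (2*u+1) (PySem.Int.floordiv (a+b) 2+1) b ql qr v (segUpdate f (2*u) a (PySem.Int.floordiv (a+b) 2) ql qr v (segPush u a b s))).1 (2*u+1))), (segUpdate f (2*u+1) (PySem.Int.floordiv (a+b) 2+1) b ql qr v (segUpdate f (2*u) a (PySem.Int.floordiv (a+b) 2) ql qr v (segPush u a b s))).2) (segUpdate f (2*u+1) (PySem.Int.floordiv (a+b) 2+1) b ql qr v (segUpdate f (2*u) a (PySem.Int.floordiv (a+b) 2) ql qr v (segPush u a b s))) (2*u+1) (PySem.Int.floordiv (a+b) 2+1) b i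
            (fun w hw => ⟨fset_other _ _ _ (ne_top_r hu hw), rfl⟩),
          ih (2*u+1) (PySem.Int.floordiv (a+b) 2+1) b ql qr v i (segUpdate f (2*u) a (PySem.Int.floordiv (a+b) 2) ql qr v (segPush u a b s)) (by omega) (by omega) (by omega) (by omega) hib,
          vAt_congr f (segUpdate f (2*u) a (PySem.Int.floordiv (a+b) 2) ql qr v (segPush u a b s)) (segPush u a b s) (2*u+1) (PySem.Int.floordiv (a+b) 2+1) b i
            (fun w hw => upd_out f (2*u) a (PySem.Int.floordiv (a+b) 2) ql qr v (segPush u a b s) w (by omega)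
              (fun hh => inTree_disjoint hu hh hw))]
        exact bxor_rot _ _ _


theorem segQuery_dis {f u : Nat} {a b ql qr : Int} {s : St} (h1 : ¬ a > b)
    (h2 : ql > b ∨ qr < a) :
    segQuery (f+1) u a b ql qr s = (0, segPush u a b s) := by
  simp only [segQuery]; rw [if_neg h1, if_pos h2]

theorem segQuery_cov {f u : Nat} {a b ql qr : Int} {s : St} (h1 : ¬ a > b)
    (h2 : ¬ (ql > b ∨ qr < a)) (h3 : ql ≤ a ∧ qr ≥ b) :
    segQuery (f+1) u a b ql qr s = ((segPush u a b s).1 u, segPush u a b s) := by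
  simp only [segQuery]; rw [if_neg h1, if_neg h2, if_pos h3]

theorem segQuery_rec {f u : Nat} {a b ql qr : Int} {s : St} (h1 : ¬ a > b)
    (h2 : ¬ (ql > b ∨ qr < a)) (h3 : ¬ (ql ≤ a ∧ qr ≥ b)) :
    segQuery (f+1) u a b ql qr s = (PySem.Int.bxor (segQuery f (2*u) a (PySem.Int.floordiv (a+b) 2) ql qr (segPush u a b s)).1 (segQuery f (2*u+1) (PySem.Int.floordiv (a+b) 2+1) b ql qr ((segQuery f (2*u) a (PySem.Int.floordiv (a+b) 2) ql qr (segPush u a b s)).2)).1, (segQuery f (2*u+1) (PySem.Int.floordiv (a+b) 2+1) b ql qr ((segQuery f (2*u) a (PySem.Int.floordiv (a+b) 2) ql qr (segPush u a b s)).2)).2) := by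
  simp only [segQuery]; rw [if_neg h1, if_neg h2, if_neg h3]

theorem q_val_zero : ∀ (f u : Nat) (a b ql qr : Int) (s : St), 1 ≤ f → ¬ a > b →
    (ql > b ∨ qr < a) → (segQuery f u a b ql qr s).1 = 0 := by
  intro f u a b ql qr s hf h1 h2
  cases f with
  | zero => omega
  | succ f => rw [segQuery_dis h1 h2]

theorem q_pres : ∀ (f u : Nat) (a b ql qr : Int) (s : St), 1 ≤ u → a ≤ b → (b - a).toNat < f →
    (∀ w, ¬ inTree u w → ((segQuery f u a b ql qr s).2).1 w = s.1 w ∧ ((segQuery f u a b ql qr s).2).2 w = s.2 w)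
    ∧ (∀ j, vAt f ((segQuery f u a b ql qr s).2) u a b j = vAt f s u a b j) := by
  intro f
  induction f with
  | zero => intro u a b ql qr s _ _ hf; omega
  | succ f ih =>
    intro u a b ql qr s hu hab hf
    have h1 : ¬ a > b := by omega
    by_cases h2 : ql > b ∨ qr < a
    · rw [segQuery_dis h1 h2]
      exact ⟨fun w hw => push_out u a b s w hw, fun j => push_vAt s hu hab (by omega) j⟩
    by_cases h3 : ql ≤ a ∧ qr ≥ b
    · rw [segQuery_cov h1 h2 h3]
      exact ⟨fun w hw => push_out u a b s w hw, fun j => push_vAt s hu hab (by omega) j⟩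
    · rw [segQuery_rec h1 h2 h3]
      have h4 : a ≠ b := by
        intro e; push_neg at h2; exact h3 ⟨by omega, by omega⟩
      have hlt : a < b := lt_of_le_of_ne hab h4
      have hm1 : a ≤ PySem.Int.floordiv (a+b) 2 := mid_lb hab
      have hm2 : PySem.Int.floordiv (a+b) 2 < b := mid_lt hlt
      have IH1 := ih (2*u) a (PySem.Int.floordiv (a+b) 2) ql qr (segPush u a b s) (by omega) hm1 (by omega)
      have IH2 := ih (2*u+1) (PySem.Int.floordiv (a+b) 2+1) b ql qr ((segQuery f (2*u) a (PySem.Int.floordiv (a+b) 2) ql qr (segPush u a b s)).2) (by omega) (by omega) (by omega)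
      constructor
      · intro w hw
        have hwL : ¬ inTree (2*u) w := fun hh => hw (inTree_left hh)
        have hwR : ¬ inTree (2*u+1) w := fun hh => hw (inTree_right hh)
        have hp := push_out u a b s w hw
        exact ⟨by show ((segQuery f (2*u+1) (PySem.Int.floordiv (a+b) 2+1) b ql qr ((segQuery f (2*u) a (PySem.Int.floordiv (a+b) 2) ql qr (segPush u a b s)).2)).2).1 w = s.1 w
                  rw [(IH2.1 w hwR).1, (IH1.1 w hwL).1, hp.1],
               by show ((segQuery f (2*u+1) (PySem.Int.floordiv (a+b) 2+1) b ql qr ((segQuery f (2*u) a (PySem.Int.floordiv (a+b) 2) ql qr (segPush u a b s)).2)).2).2 w = s.2 w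
                  rw [(IH2.1 w hwR).2, (IH1.1 w hwL).2, hp.2]⟩
      · intro j
        rw [← push_vAt s hu hab (by omega) j]
        have eQ2 : (((segQuery f (2*u+1) (PySem.Int.floordiv (a+b) 2+1) b ql qr ((segQuery f (2*u) a (PySem.Int.floordiv (a+b) 2) ql qr (segPush u a b s)).2)).2)).2 u = (((segQuery f (2*u) a (PySem.Int.floordiv (a+b) 2) ql qr (segPush u a b s)).2)).2 u := (IH2.1 u (not_inTree_lt (by omega))).2
        have eQ1 : (((segQuery f (2*u) a (PySem.Int.floordiv (a+b) 2) ql qr (segPush u a b s)).2)).2 u = (segPush u a b s).2 u := (IH1.1 u (not_inTree_lt (by omega))).2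
        by_cases hj : j ≤ PySem.Int.floordiv (a+b) 2
        · simp only [vAt, if_neg h4, if_pos hj]
          rw [eQ2, eQ1,
            vAt_congr f ((segQuery f (2*u+1) (PySem.Int.floordiv (a+b) 2+1) b ql qr ((segQuery f (2*u) a (PySem.Int.floordiv (a+b) 2) ql qr (segPush u a b s)).2)).2) ((segQuery f (2*u) a (PySem.Int.floordiv (a+b) 2) ql qr (segPush u a b s)).2) (2*u) a (PySem.Int.floordiv (a+b) 2) j
              (fun w hw => IH2.1 w (fun hh => inTree_disjoint hu hw hh)),
            IH1.2 j]
        · simp only [vAt, if_neg h4, if_neg hj]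
          rw [eQ2, eQ1, IH2.2 j,
            vAt_congr f ((segQuery f (2*u) a (PySem.Int.floordiv (a+b) 2) ql qr (segPush u a b s)).2) (segPush u a b s) (2*u+1) (PySem.Int.floordiv (a+b) 2+1) b j
              (fun w hw => IH1.1 w (fun hh => inTree_disjoint hu hh hw))]

theorem q_val : ∀ (f u : Nat) (a b i : Int) (s : St), 1 ≤ u → a ≤ b → (b - a).toNat < f →
    a ≤ i → i ≤ b → (segQuery f u a b i i s).1 = vAt f s u a b i := by
  intro f
  induction f with
  | zero => intro u a b i s _ _ hf _ _; omega
  | succ f ih =>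
    intro u a b i s hu hab hf hai hib
    have h1 : ¬ a > b := by omega
    have h2 : ¬ (i > b ∨ i < a) := by omega
    by_cases h3 : i ≤ a ∧ i ≥ b
    · rw [segQuery_cov h1 h2 h3, ← push_vAt s hu hab (by omega) i]
      have hab' : a = b := by omega
      simp only [vAt, if_pos hab']
      rw [push_lazy_self u a b s hu, zero_bxor]
    · rw [segQuery_rec h1 h2 h3, ← push_vAt s hu hab (by omega) i]
      have h4 : a ≠ b := by omega
      have hlt : a < b := lt_of_le_of_ne hab h4
      have hm1 : a ≤ PySem.Int.floordiv (a+b) 2 := mid_lb hab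
      have hm2 : PySem.Int.floordiv (a+b) 2 < b := mid_lt hlt
      have hf1 : 1 ≤ f := by omega
      by_cases hi : i ≤ PySem.Int.floordiv (a+b) 2
      · simp only [vAt, if_neg h4, if_pos hi]
        rw [q_val_zero f (2*u+1) (PySem.Int.floordiv (a+b) 2+1) b i i _ hf1 (by omega) (Or.inr (by omega)),
          PySem.Int.bxor_zero,
          ih (2*u) a (PySem.Int.floordiv (a+b) 2) i (segPush u a b s) (by omega) hm1 (by omega) hai hi,
          push_lazy_self u a b s hu, zero_bxor]
      · simp only [vAt, if_neg h4, if_neg hi]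
        rw [q_val_zero f (2*u) a (PySem.Int.floordiv (a+b) 2) i i _ hf1 (by omega) (Or.inl (by omega)),
          ih (2*u+1) (PySem.Int.floordiv (a+b) 2+1) b i _ (by omega) (by omega) (by omega) (by omega) hib,
          vAt_congr f ((segQuery f (2*u) a (PySem.Int.floordiv (a+b) 2) i i (segPush u a b s)).2) (segPush u a b s) (2*u+1) (PySem.Int.floordiv (a+b) 2+1) b i
            (fun w hw => (q_pres f (2*u) a (PySem.Int.floordiv (a+b) 2) i i (segPush u a b s) (by omega) hm1 (by omega)).1 w
              (fun hh => inTree_disjoint hu hh hw)),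
          zero_bxor, push_lazy_self u a b s hu, zero_bxor]


theorem segBuild_leaf {f : Nat} {arr : List Int} {u : Nat} {a b : Int} {s : St}
    (hab : a = b) : segBuild (f+1) arr u a b s =
      (fset s.1 u ((PySem.List.pyGet? arr a).getD 0), s.2) := by
  simp only [segBuild]; rw [if_pos hab]

theorem segBuild_node {f : Nat} {arr : List Int} {u : Nat} {a b : Int} {s : St}
    (hab : ¬ a = b) : segBuild (f+1) arr u a b s = (fset (segBuild f arr (2*u+1) (PySem.Int.floordiv (a+b) 2+1) b (segBuild f arr (2*u) a (PySem.Int.floordiv (a+b) 2) s)).1 u (PySem.Int.bxor ((segBuild f arr (2*u+1) (PySem.Int.floordiv (a+b) 2+1) b (segBuild f arr (2*u) a (PySem.Int.floordiv (a+b) 2) s)).1 (2*u)) ((segBuild f arr (2*u+1) (PySem.Int.floordiv (a+b) 2+1) b (segBuild f arr (2*u) a (PySem.Int.floordiv (a+b) 2) s)).1 (2*u+1))), (segBuild f arr (2*u+1) (PySem.Int.floordiv (a+b) 2+1) b (segBuild f arr (2*u) a (PySem.Int.floordiv (a+b) 2) s)).2) := by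
  simp only [segBuild]; rw [if_neg hab]

theorem build_lazy : ∀ (f : Nat) (arr : List Int) (u : Nat) (a b : Int) (s : St),
    (segBuild f arr u a b s).2 = s.2 := by
  intro f
  induction f with
  | zero => intro arr u a b s; rfl
  | succ f ih =>
    intro arr u a b s
    by_cases hab : a = b
    · rw [segBuild_leaf hab]
    · rw [segBuild_node hab]
      show (segBuild f arr (2*u+1) (PySem.Int.floordiv (a+b) 2+1) b (segBuild f arr (2*u) a (PySem.Int.floordiv (a+b) 2) s)).2 = s.2
      rw [ih, ih]

theorem build_out : ∀ (f : Nat) (arr : List Int) (u : Nat) (a b : Int) (s : St) (w : Nat),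
    ¬ inTree u w → (segBuild f arr u a b s).1 w = s.1 w := by
  intro f
  induction f with
  | zero => intro arr u a b s w _; rfl
  | succ f ih =>
    intro arr u a b s w hw
    have hwu : w ≠ u := fun e => hw (e ▸ inTree_self u)
    by_cases hab : a = b
    · rw [segBuild_leaf hab]
      exact fset_other _ _ _ hwu
    · rw [segBuild_node hab]
      show fset (segBuild f arr (2*u+1) (PySem.Int.floordiv (a+b) 2+1) b (segBuild f arr (2*u) a (PySem.Int.floordiv (a+b) 2) s)).1 u _ w = s.1 w
      rw [fset_other _ _ _ hwu,
        ih arr (2*u+1) (PySem.Int.floordiv (a+b) 2+1) b (segBuild f arr (2*u) a (PySem.Int.floordiv (a+b) 2) s) w (fun hh => hw (inTree_right hh)),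
        ih arr (2*u) a (PySem.Int.floordiv (a+b) 2) s w (fun hh => hw (inTree_left hh))]

theorem build_vAt : ∀ (f : Nat) (arr : List Int) (u : Nat) (a b i : Int) (s : St), 1 ≤ u →
    a ≤ b → (b - a).toNat < f → a ≤ i → i ≤ b → (∀ w, s.2 w = 0) →
    vAt f (segBuild f arr u a b s) u a b i = (PySem.List.pyGet? arr i).getD 0 := by
  intro f
  induction f with
  | zero => intro arr u a b i s _ _ hf _ _ _; omega
  | succ f ih =>
    intro arr u a b i s hu hab hf hai hib hlz
    by_cases hab' : a = b
    · rw [segBuild_leaf hab']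
      have hia : i = a := by omega
      simp only [vAt, if_pos hab', fset_same]
      rw [hlz u, zero_bxor, hia]
    · rw [segBuild_node hab']
      have hlt : a < b := lt_of_le_of_ne hab hab'
      have hm1 : a ≤ PySem.Int.floordiv (a+b) 2 := mid_lb hab
      have hm2 : PySem.Int.floordiv (a+b) 2 < b := mid_lt hlt
      have lz1 : (segBuild f arr (2*u) a (PySem.Int.floordiv (a+b) 2) s).2 = s.2 := build_lazy f arr (2*u) a (PySem.Int.floordiv (a+b) 2) s
      have lz2 : (segBuild f arr (2*u+1) (PySem.Int.floordiv (a+b) 2+1) b (segBuild f arr (2*u) a (PySem.Int.floordiv (a+b) 2) s)).2 = (segBuild f arr (2*u) a (PySem.Int.floordiv (a+b) 2) s).2 := build_lazy f arr (2*u+1) (PySem.Int.floordiv (a+b) 2+1) b (segBuild f arr (2*u) a (PySem.Int.floordiv (a+b) 2) s)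
      by_cases hi : i ≤ PySem.Int.floordiv (a+b) 2
      · simp only [vAt, if_neg hab', if_pos hi]
        rw [congrFun lz2 u, congrFun lz1 u, hlz u, zero_bxor,
          vAt_congr f (fset (segBuild f arr (2*u+1) (PySem.Int.floordiv (a+b) 2+1) b (segBuild f arr (2*u) a (PySem.Int.floordiv (a+b) 2) s)).1 u (PySem.Int.bxor ((segBuild f arr (2*u+1) (PySem.Int.floordiv (a+b) 2+1) b (segBuild f arr (2*u) a (PySem.Int.floordiv (a+b) 2) s)).1 (2*u)) ((segBuild f arr (2*u+1) (PySem.Int.floordiv (a+b) 2+1) b (segBuild f arr (2*u) a (PySem.Int.floordiv (a+b) 2) s)).1 (2*u+1))), (segBuild f arr (2*u+1) (PySem.Int.floordiv (a+b) 2+1) b (segBuild f arr (2*u) a (PySem.Int.floordiv (a+b) 2) s)).2) (segBuild f arr (2*u+1) (PySem.Int.floordiv (a+b) 2+1) b (segBuild f arr (2*u) a (PySem.Int.floordiv (a+b) 2) s)) (2*u) a (PySem.Int.floordiv (a+b) 2) i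
            (fun w hw => ⟨fset_other _ _ _ (ne_top_l hu hw), rfl⟩),
          vAt_congr f (segBuild f arr (2*u+1) (PySem.Int.floordiv (a+b) 2+1) b (segBuild f arr (2*u) a (PySem.Int.floordiv (a+b) 2) s)) (segBuild f arr (2*u) a (PySem.Int.floordiv (a+b) 2) s) (2*u) a (PySem.Int.floordiv (a+b) 2) i
            (fun w hw => ⟨build_out f arr (2*u+1) (PySem.Int.floordiv (a+b) 2+1) b (segBuild f arr (2*u) a (PySem.Int.floordiv (a+b) 2) s) w
              (fun hh => inTree_disjoint hu hw hh), congrFun lz2 w⟩)]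
        exact ih arr (2*u) a (PySem.Int.floordiv (a+b) 2) i s (by omega) hm1 (by omega) hai hi hlz
      · simp only [vAt, if_neg hab', if_neg hi]
        rw [congrFun lz2 u, congrFun lz1 u, hlz u, zero_bxor,
          vAt_congr f (fset (segBuild f arr (2*u+1) (PySem.Int.floordiv (a+b) 2+1) b (segBuild f arr (2*u) a (PySem.Int.floordiv (a+b) 2) s)).1 u (PySem.Int.bxor ((segBuild f arr (2*u+1) (PySem.Int.floordiv (a+b) 2+1) b (segBuild f arr (2*u) a (PySem.Int.floordiv (a+b) 2) s)).1 (2*u)) ((segBuild f arr (2*u+1) (PySem.Int.floordiv (a+b) 2+1) b (segBuild f arr (2*u) a (PySem.Int.floordiv (a+b) 2) s)).1 (2*u+1))), (segBuild f arr (2*u+1) (PySem.Int.floordiv (a+b) 2+1) b (segBuild f arr (2*u) a (PySem.Int.floordiv (a+b) 2) s)).2) (segBuild f arr (2*u+1) (PySem.Int.floordiv (a+b) 2+1) b (segBuild f arr (2*u) a (PySem.Int.floordiv (a+b) 2) s)) (2*u+1) (PySem.Int.floordiv (a+b) 2+1) b i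
            (fun w hw => ⟨fset_other _ _ _ (ne_top_r hu hw), rfl⟩)]
        exact ih arr (2*u+1) (PySem.Int.floordiv (a+b) 2+1) b i (segBuild f arr (2*u) a (PySem.Int.floordiv (a+b) 2) s) (by omega) (by omega) (by omega) (by omega) hib
          (fun w => (congrFun lz1 w).trans (hlz w))

theorem fold_upd_vAt (n : Nat) (hn : 1 ≤ n) : ∀ (qs : List (Int × Int × Int)) (s : St) (i : Int),
    0 ≤ i → i ≤ (n:Int) - 1 →
    vAt n (qs.foldl (fun s q => segUpdate n 1 0 ((n:Int) - 1) q.1 q.2.1 q.2.2 s) s) 1 0 ((n:Int) - 1) i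
      = PySem.Int.bxor (cov i qs) (vAt n s 1 0 ((n:Int) - 1) i) := by
  intro qs
  induction qs with
  | nil => intro s i h0 h1; rw [List.foldl_nil]; exact (zero_bxor _).symm
  | cons q qs ih =>
    intro s i h0 h1
    rw [List.foldl_cons, ih _ i h0 h1,
      upd_vAt n 1 0 ((n:Int) - 1) q.1 q.2.1 q.2.2 i s (le_refl 1) (by omega) (by omega) h0 h1]
    show _ = PySem.Int.bxor (PySem.Int.bxor _ (cov i qs)) _
    rw [bxor_assoc]
    exact bxor_rot _ _ _

theorem loop_spec (n : Nat) (hn : 1 ≤ n) : ∀ (is : List Nat) (acc : List Int) (s : St),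
    (∀ j ∈ is, j < n) →
    (List.foldl (fun (acc : List Int × St) (i : Nat) =>
        let qr := segQuery n 1 0 ((n:Int) - 1) (i:Int) (i:Int) acc.2
        (acc.1 ++ [qr.1], qr.2)) (acc, s) is).1
      = acc ++ is.map (fun i : Nat => vAt n s 1 0 ((n:Int) - 1) (i:Int)) := by
  intro is
  induction is with
  | nil => intro acc s _; simp
  | cons i is ih =>
    intro acc s h
    have hin : i < n := h i List.mem_cons_self
    rw [List.foldl_cons, List.map_cons]
    show (List.foldl _
      (acc ++ [(segQuery n 1 0 ((n:Int) - 1) (i:Int) (i:Int) s).1],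
       (segQuery n 1 0 ((n:Int) - 1) (i:Int) (i:Int) s).2) is).1 = _
    rw [ih (acc ++ [(segQuery n 1 0 ((n:Int) - 1) (i:Int) (i:Int) s).1])
        ((segQuery n 1 0 ((n:Int) - 1) (i:Int) (i:Int) s).2)
        (fun j hj => h j (List.mem_cons_of_mem _ hj)),
      q_val n 1 0 ((n:Int) - 1) (i:Int) s (le_refl 1) (by omega) (by omega) (by omega) (by omega)]
    have hfun : (fun i' : Nat =>
        vAt n ((segQuery n 1 0 ((n:Int) - 1) (i:Int) (i:Int) s).2) 1 0 ((n:Int) - 1) (i':Int))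
        = (fun i' : Nat => vAt n s 1 0 ((n:Int) - 1) (i':Int)) :=
      funext (fun j =>
        (q_pres n 1 0 ((n:Int) - 1) (i:Int) (i:Int) s (le_refl 1) (by omega) (by omega)).2 (j:Int))
    rw [hfun, List.append_assoc, List.singleton_append]

theorem A_char (arr : List Int) (qs : List (Int × Int × Int)) (h : arr ≠ []) :
    updateArray arr qs = (List.range arr.length).map
      (fun i : Nat => PySem.Int.bxor (cov (i:Int) qs) ((PySem.List.pyGet? arr (i:Int)).getD 0)) := by
  have hn : 1 ≤ arr.length := by
    cases arr with
    | nil => exact absurd rfl h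
    | cons x xs => exact Nat.succ_le_succ (Nat.zero_le _)
  simp only [updateArray]
  rw [loop_spec arr.length hn (List.range arr.length) [] _ (fun j hj => List.mem_range.mp hj),
    List.nil_append]
  apply List.map_congr_left
  intro i hi
  have hi' : i < arr.length := List.mem_range.mp hi
  rw [fold_upd_vAt arr.length hn qs _ (i:Int) (by omega) (by omega),
    build_vAt arr.length arr 1 0 ((arr.length:Int) - 1) (i:Int) (fun _ => 0, fun _ => 0)
      (le_refl 1) (by omega) (by omega) (by omega) (by omega) (fun w => rfl)]

-- ===== B side =====
def pxUpTo (d : List Int) : Nat → Int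
  | 0 => d.getD 0 0
  | i+1 => PySem.Int.bxor (pxUpTo d i) (d.getD (i+1) 0)

theorem getD_set (d : List Int) (j k : Nat) (a : Int) (hj : j < d.length) :
    (d.set j a).getD k 0 = if k = j then a else d.getD k 0 := by
  by_cases hkj : k = j
  · subst hkj; simp [List.getD, List.getElem?_set, hj]
  · simp [List.getD, List.getElem?_set, hkj, (Ne.symm hkj : j ≠ k)]

theorem pxUpTo_set (d : List Int) (j : Nat) (v : Int) (hj : j < d.length) : ∀ i,
    pxUpTo (d.set j (PySem.Int.bxor (d.getD j 0) v)) i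
      = PySem.Int.bxor (pxUpTo d i) (if j ≤ i then v else 0) := by
  intro i
  induction i with
  | zero =>
    simp only [pxUpTo]
    rw [getD_set d j 0 _ hj]
    by_cases h0 : j = 0
    · subst h0
      rw [if_pos rfl, if_pos (le_refl 0)]
    · rw [if_neg (show ¬ (0:Nat) = j from fun e => h0 e.symm),
        if_neg (show ¬ j ≤ 0 by omega), PySem.Int.bxor_zero]
  | succ i ihp =>
    simp only [pxUpTo]
    rw [ihp, getD_set d j (i+1) _ hj]
    by_cases h1 : j ≤ i
    · rw [if_pos h1, if_neg (show ¬ i+1 = j by omega), if_pos (show j ≤ i+1 by omega)]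
      exact bxor_right_comm _ _ _
    · by_cases h2 : j = i+1
      · rw [if_neg h1, PySem.Int.bxor_zero, if_pos (show i+1 = j from h2.symm),
          if_pos (show j ≤ i+1 by omega)]
        subst h2
        exact (bxor_assoc _ _ _).symm
      · rw [if_neg h1, PySem.Int.bxor_zero, if_neg (show ¬ i+1 = j by omega),
          if_neg (show ¬ j ≤ i+1 by omega), PySem.Int.bxor_zero]

theorem pxUpTo_replicate (n : Nat) : ∀ i, pxUpTo (List.replicate n (0:Int)) i = 0 := by
  have hget : ∀ k, (List.replicate n (0:Int)).getD k 0 = 0 := by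
    intro k
    by_cases hk : k < n <;> simp [List.getD, List.getElem?_replicate, hk]
  intro i
  induction i with
  | zero => simp [pxUpTo, hget]
  | succ i ih => simp [pxUpTo, hget, ih, PySem.Int.bxor_zero]

theorem step_px (n : Nat) (q : Int × Int × Int) (d : List Int) (hlen : d.length = n + 1)
    (i : Nat) (hi : i < n) :
    pxUpTo (if max q.1 0 ≤ min q.2.1 ((n:Int) - 1) then
          (d.set (max q.1 0).toNat (PySem.Int.bxor (d.getD (max q.1 0).toNat 0) q.2.2)).set
            ((min q.2.1 ((n:Int) - 1))+1).toNat
            (PySem.Int.bxor ((d.set (max q.1 0).toNat (PySem.Int.bxor (d.getD (max q.1 0).toNat 0) q.2.2)).getD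
              ((min q.2.1 ((n:Int) - 1))+1).toNat 0) q.2.2)
        else d) i
      = PySem.Int.bxor (pxUpTo d i) (if q.1 ≤ (i:Int) ∧ (i:Int) ≤ q.2.1 then q.2.2 else 0) := by
  obtain ⟨l, r, v⟩ := q
  dsimp only
  by_cases hle : max l 0 ≤ min r ((n:Int)-1)
  · rw [if_pos hle,
      pxUpTo_set _ _ _ (by rw [List.length_set]; omega),
      pxUpTo_set _ _ _ (by omega)]
    split_ifs <;> first
      | omega
      | simp [bxor_assoc, PySem.Int.bxor_self, PySem.Int.bxor_zero]
  · rw [if_neg hle, if_neg (show ¬ (l ≤ (i:Int) ∧ (i:Int) ≤ r) by omega), PySem.Int.bxor_zero]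

theorem fold_d_px (n : Nat) : ∀ (qs : List (Int × Int × Int)) (d : List Int),
    d.length = n + 1 → ∀ i : Nat, i < n →
    pxUpTo (qs.foldl (fun (d : List Int) q =>
        let lo := max q.1 0
        let hi := min q.2.1 ((n:Int) - 1)
        if lo ≤ hi then
          let d1 := d.set lo.toNat (PySem.Int.bxor (d.getD lo.toNat 0) q.2.2)
          d1.set (hi+1).toNat (PySem.Int.bxor (d1.getD (hi+1).toNat 0) q.2.2)
        else d) d) i
      = PySem.Int.bxor (pxUpTo d i) (cov (i:Int) qs) := by
  intro qs
  induction qs with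
  | nil =>
    intro d hlen i hi
    rw [List.foldl_nil]
    simp [cov, PySem.Int.bxor_zero]
  | cons q qs ih =>
    intro d hlen i hi
    rw [List.foldl_cons]
    show pxUpTo (List.foldl _ (if max q.1 0 ≤ min q.2.1 ((n:Int) - 1) then
          (d.set (max q.1 0).toNat (PySem.Int.bxor (d.getD (max q.1 0).toNat 0) q.2.2)).set
            ((min q.2.1 ((n:Int) - 1))+1).toNat
            (PySem.Int.bxor ((d.set (max q.1 0).toNat (PySem.Int.bxor (d.getD (max q.1 0).toNat 0) q.2.2)).getD
              ((min q.2.1 ((n:Int) - 1))+1).toNat 0) q.2.2)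
        else d) qs) i = _
    rw [ih (if max q.1 0 ≤ min q.2.1 ((n:Int) - 1) then
          (d.set (max q.1 0).toNat (PySem.Int.bxor (d.getD (max q.1 0).toNat 0) q.2.2)).set
            ((min q.2.1 ((n:Int) - 1))+1).toNat
            (PySem.Int.bxor ((d.set (max q.1 0).toNat (PySem.Int.bxor (d.getD (max q.1 0).toNat 0) q.2.2)).getD
              ((min q.2.1 ((n:Int) - 1))+1).toNat 0) q.2.2)
        else d) (by by_cases hle : max q.1 0 ≤ min q.2.1 ((n:Int) - 1) <;>
          simp [hle, List.length_set, hlen]) i hi,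
      step_px n q d hlen i hi]
    simp only [cov]
    rw [bxor_assoc]

theorem scan_spec (d : List Int) : ∀ (xs : List Int) (j : Nat) (acc : Int),
    PySem.Int.bxor acc (d.getD j 0) = pxUpTo d j →
    altScan d acc j xs = (List.range xs.length).map
      (fun k => PySem.Int.bxor (xs.getD k 0) (pxUpTo d (j+k))) := by
  intro xs
  induction xs with
  | nil => intro j acc _; simp [altScan]
  | cons x xs ih =>
    intro j acc hacc
    simp only [altScan]
    rw [ih (j+1) (PySem.Int.bxor acc (d.getD j 0))
        (by simp only [pxUpTo]; rw [hacc]),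
      List.length_cons, List.range_succ_eq_map, List.map_cons, List.map_map]
    congr 1
    · show PySem.Int.bxor x (PySem.Int.bxor acc (d.getD j 0))
        = PySem.Int.bxor ((x :: xs).getD 0 0) (pxUpTo d (j+0))
      rw [hacc]
      rfl
    · apply List.map_congr_left
      intro k _
      show PySem.Int.bxor (xs.getD k 0) (pxUpTo d (j+1+k))
        = PySem.Int.bxor ((x :: xs).getD (k+1) 0) (pxUpTo d (j+(k+1)))
      rw [show j+(k+1) = j+1+k from by omega]
      rfl

theorem B_char (arr : List Int) (qs : List (Int × Int × Int)) :
    updateArray_alt arr qs = (List.range arr.length).map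
      (fun k : Nat => PySem.Int.bxor (arr.getD k 0) (cov (k:Int) qs)) := by
  simp only [updateArray_alt]
  rw [scan_spec _ arr 0 0 (by rw [zero_bxor]; rfl)]
  apply List.map_congr_left
  intro k hk
  have hk' : k < arr.length := List.mem_range.mp hk
  rw [Nat.zero_add,
    fold_d_px arr.length qs (List.replicate (arr.length+1) 0) (by rw [List.length_replicate]) k hk',
    pxUpTo_replicate, zero_bxor]

-- ===== VERDICT (by name: the statement is the Claim_ definition above) =====
theorem updateArray_spec : Claim_equal_updateArray := by
  intro arr qs _ hpre
  unfold Spec_updateArray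
  rw [A_char arr qs hpre, B_char arr qs]
  apply List.map_congr_left
  intro i hi
  have hi' : i < arr.length := List.mem_range.mp hi
  rw [PySem.Int.bxor_comm]
  congr 1
  show PySem.List.pyGetD arr (i:Int) 0 = arr.getD i 0
  exact PySem.List.pyGetD_natCast arr i 0
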